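-- pv_equiv track=rewrite | github.com/stephen-th0ma5/FaceAndDigitClassification | features.py | vertical_lines
-- ===== SOURCE A (Python) =====
-- def vertical_lines(matrix, image_no):
--     image = matrix[image_no]
--     rotated = [list(reversed(col)) for col in zip(*image)]
--     counter = 0
--     spaces = 0
--     lines = []
--     for line in rotated:
--         if(counter > 6):
--             lines.append(1)
--         else:
--             lines.append(0)
--         counter = 0
--         spaces = 0
--         for char in line:
--             if(char == "+" or char == "#"):
--                 if(spaces > 0):
--                     counter = 0
--                     spaces = 0
--                 counter += 1
--             else:
--                 spaces += 1
--     count = 0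
--     value = 0
--     for num in lines:
--         if(num == 1):
--             count += 1
--         else:
--             if(count > 1):
--                 value += 1
--             count = 0
--     return value
-- ===== SOURCE B (Python) =====
-- def vertical_lines(matrix, image_no):
--     image = matrix[image_no]
--     columns = [list(reversed(col)) for col in zip(*image)]
--     # length of the last maximal run of filled cells in each column (bottom-up scan)
--     runs = []
--     for line in columns:
--         cur = 0
--         run = 0
--         for ch in line:
--             if ch == "+" or ch == "#":
--                 cur += 1
--                 run = cur
--             else:
--                 cur = 0
--         runs.append(run)
--     flags = [1 if r > 6 else 0 for r in runs]
--     # count groups of at least two consecutive tall columns: a group starts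
--     # where a 0 is followed by two 1s, so pad with a leading 0 and scan windows
--     padded = [0] + flags
--     return sum(1 for a, b, c in zip(padded, padded[1:], padded[2:])
--                if a == 0 and b == 1 and c == 1)
-- ===== Notes on version B (the rewrite author's own statement) =====
-- stated objective: alternative
-- what changed: Replaces A's interleaved loop (which both emits the previous column's flag and recomputes the run counter) by three separated passes: per-column last-run lengths, a per-column tall flag, and a windowed scan over the 0-padded flag list that counts each group of >=2 consecutive tall columns at its start.
-- intended difference: On images whose group of >=2 consecutive tall columns touches one of the last two columns, A returns a count one less than B, because A emits each column's flag one iteration late and never flags the final column; B counts every group, which is the intended 'count groups of vertical lines'. — e.g. on vertical_lines([[["#", "#"], ["#", "#"], ["#", "#"], ["#", "#"], ["#", "#"], ["#", "#"], ["#", "#"]]], 0): A returns 0, B returns 1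
import Mathlib
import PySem

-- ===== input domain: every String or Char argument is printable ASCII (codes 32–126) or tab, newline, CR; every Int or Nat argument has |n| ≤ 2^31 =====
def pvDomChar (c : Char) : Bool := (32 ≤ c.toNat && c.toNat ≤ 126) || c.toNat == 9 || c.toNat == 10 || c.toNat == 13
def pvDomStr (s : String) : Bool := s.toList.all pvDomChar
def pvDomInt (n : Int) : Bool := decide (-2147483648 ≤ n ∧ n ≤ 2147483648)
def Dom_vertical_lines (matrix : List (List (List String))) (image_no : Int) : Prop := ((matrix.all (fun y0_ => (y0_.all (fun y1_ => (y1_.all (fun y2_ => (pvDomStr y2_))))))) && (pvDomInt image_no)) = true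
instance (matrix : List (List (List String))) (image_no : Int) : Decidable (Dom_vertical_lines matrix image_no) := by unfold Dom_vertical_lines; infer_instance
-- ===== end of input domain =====

-- B separates A's interleaved flag/counter loop into three passes (per-column runs, tall flags, counting group starts over the 0-padded flag list); same cost, different decomposition; B additionally counts a group of tall columns touching the right image edge, which A misses (stated as D_ below).


-- ===== PORT A =====
-- zip(*image): truncate to the shortest row, column i = the i-th element of every row (used by both Pythons)
def pyZipStar (rows : List (List String)) : List (List String) :=
  match rows with
  | [] => []
  | r :: rs =>
    let n := (r :: rs).foldl (fun m l => min m l.length) r.length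
    (List.range n).map (fun i => (r :: rs).map (fun l => l.getD i ""))

def vertical_lines (matrix : List (List (List String))) (image_no : Int) : Int :=
  match PySem.List.pyGet? matrix image_no with
  | none => 0  -- unreachable under Pre_ (Python raises IndexError here)
  | some image =>
    let rotated := (pyZipStar image).map List.reverse
    let st :=
      rotated.foldl (fun (st : Int × Int × List Int) line =>
        let lines := if st.1 > 6 then st.2.2 ++ [(1 : Int)] else st.2.2 ++ [(0 : Int)]
        let cs :=
          line.foldl (fun (cs : Int × Int) ch =>
            if ch == "+" || ch == "#" then
              let cs' := if cs.2 > 0 then ((0 : Int), (0 : Int)) else cs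
              (cs'.1 + 1, cs'.2)
            else (cs.1, cs.2 + 1)) (0, 0)
        (cs.1, cs.2, lines)) (0, 0, [])
    let cv :=
      st.2.2.foldl (fun (cv : Int × Int) num =>
        if num == 1 then (cv.1 + 1, cv.2)
        else ((0 : Int), if cv.1 > 1 then cv.2 + 1 else cv.2)) (0, 0)
    cv.2

-- ===== PORT B =====
def vertical_lines_alt (matrix : List (List (List String))) (image_no : Int) : Int :=
  match PySem.List.pyGet? matrix image_no with
  | none => 0  -- unreachable under Pre_ (Python raises IndexError here)
  | some image =>
    let columns := (pyZipStar image).map List.reverse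
    let runs := columns.map (fun line =>
      (line.foldl (fun (rc : Int × Int) ch =>
        if ch == "+" || ch == "#" then (rc.1 + 1, rc.1 + 1) else ((0 : Int), rc.2)) (0, 0)).2)
    let flags := runs.map (fun r => if r > 6 then (1 : Int) else 0)
    let padded : List Int := 0 :: flags
    let trips := (padded.zip (padded.drop 1)).zip (padded.drop 2)
    trips.foldl (fun v t =>
      if t.1.1 = 0 ∧ t.1.2 = 1 ∧ t.2 = 1 then v + 1 else v) 0

-- ===== PRECONDITION & SPEC =====
-- Pre_ excludes exactly the inputs where Python's matrix[image_no] raises IndexError.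
def Pre_vertical_lines (matrix : List (List (List String))) (image_no : Int) : Prop :=
  -(matrix.length : Int) ≤ image_no ∧ image_no < (matrix.length : Int)
instance (matrix : List (List (List String))) (image_no : Int) : Decidable (Pre_vertical_lines matrix image_no) := by unfold Pre_vertical_lines; infer_instance

def pvWitness_vertical_lines : List (List (List String)) × Int := ([[["#"], ["#"]]], 0)

-- a cell is a filled pixel
def pvFilled (s : String) : Bool := s = "+" ∨ s = "#"
-- column j is tall: its topmost maximal run of filled cells is longer than 6
def pvTall (image : List (List String)) (j : Nat) : Bool :=
  6 < (((image.map (fun r => r.getD j "")).dropWhile (fun s => !(pvFilled s))).takeWhile pvFilled).length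

-- On images whose group of ≥2 consecutive tall columns touches one of the last two columns,
-- A returns a count one less than B, because A emits each column's flag one iteration late and
-- never flags the final column; B counts every group, which is the intended
-- 'count groups of vertical lines'.
def D_vertical_lines (matrix : List (List (List String))) (image_no : Int) : Prop :=
  ((PySem.List.pyGet? matrix image_no).map (fun img =>
      let n := (img.map List.length).min?.getD 0
      decide (2 ≤ n) && pvTall img (n-2)
        && (pvTall img (n-1) || (decide (3 ≤ n) && pvTall img (n-3))))).getD false = true
instance (matrix : List (List (List String))) (image_no : Int) : Decidable (D_vertical_lines matrix image_no) := by unfold D_vertical_lines; infer_instance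

def Spec_vertical_lines (matrix : List (List (List String))) (image_no : Int) (out : Int) : Prop := ¬ D_vertical_lines matrix image_no → out = vertical_lines_alt matrix image_no
instance (matrix : List (List (List String))) (image_no : Int) (out : Int) : Decidable (Spec_vertical_lines matrix image_no out) := by unfold Spec_vertical_lines; infer_instance

def pvDiffWitness_vertical_lines : List (List (List String)) × Int :=
  ([[["#", "#"], ["#", "#"], ["#", "#"], ["#", "#"], ["#", "#"], ["#", "#"], ["#", "#"]]], 0)
def pvDiffWitnessOut_vertical_lines : Int × Int := (0, 1)

-- ===== CLAIM (what is proved, stated in full; the proofs are below) =====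
def Claim_unchanged_vertical_lines : Prop := ∀ (matrix : List (List (List String))) (image_no : Int), Dom_vertical_lines matrix image_no → Pre_vertical_lines matrix image_no → Spec_vertical_lines matrix image_no (vertical_lines matrix image_no)
def Claim_changed_vertical_lines : Prop := Dom_vertical_lines (pvDiffWitness_vertical_lines.1) (pvDiffWitness_vertical_lines.2) ∧ Pre_vertical_lines (pvDiffWitness_vertical_lines.1) (pvDiffWitness_vertical_lines.2) ∧ D_vertical_lines (pvDiffWitness_vertical_lines.1) (pvDiffWitness_vertical_lines.2) ∧ vertical_lines (pvDiffWitness_vertical_lines.1) (pvDiffWitness_vertical_lines.2) = pvDiffWitnessOut_vertical_lines.1 ∧ vertical_lines_alt (pvDiffWitness_vertical_lines.1) (pvDiffWitness_vertical_lines.2) = pvDiffWitnessOut_vertical_lines.2 ∧ pvDiffWitnessOut_vertical_lines.1 ≠ pvDiffWitnessOut_vertical_lines.2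
def Claim_exact_vertical_lines : Prop := ∀ (matrix : List (List (List String))) (image_no : Int), Dom_vertical_lines matrix image_no → Pre_vertical_lines matrix image_no → D_vertical_lines matrix image_no → vertical_lines matrix image_no ≠ vertical_lines_alt matrix image_no

-- ===== LEMMAS AND PROOFS =====

-- D_'s per-image condition, as a named Bool (definitionally the lambda inside D_)
def pvDcond (img : List (List String)) : Bool :=
  let n := (img.map List.length).min?.getD 0
  decide (2 ≤ n) && pvTall img (n-2) && (pvTall img (n-1) || (decide (3 ≤ n) && pvTall img (n-3)))

-- A's inner-loop step and B's inner-loop step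
def stepA (cs : Int × Int) (ch : String) : Int × Int :=
  if ch == "+" || ch == "#" then
    let cs' := if cs.2 > 0 then ((0 : Int), (0 : Int)) else cs
    (cs'.1 + 1, cs'.2)
  else (cs.1, cs.2 + 1)

def stepB (rc : Int × Int) (ch : String) : Int × Int :=
  if ch == "+" || ch == "#" then (rc.1 + 1, rc.1 + 1) else ((0 : Int), rc.2)

-- invariant relating the two inner folds
theorem inner_eq (line : List String) : ∀ (c s cur run : Int),
    0 ≤ s → run = c → (s > 0 → cur = 0) → (¬ s > 0 → cur = c) →
    (line.foldl stepA (c, s)).1 = (line.foldl stepB (cur, run)).2 := by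
  induction line with
  | nil =>
    intro c s cur run _ h1 _ _
    simpa using h1.symm
  | cons ch rest ih =>
    intro c s cur run hs0 h1 h2 h3
    simp only [List.foldl_cons]
    by_cases hch : (ch == "+" || ch == "#") = true
    · by_cases hs : s > 0
      · have hcur : cur = 0 := h2 hs
        simpa [stepA, stepB, hch, hs, hcur] using
          ih 1 0 1 1 le_rfl rfl (by omega) (by intro; rfl)
      · have hcur : cur = c := h3 hs
        have hse : s = 0 := by omega
        simpa [stepA, stepB, hch, hs, hcur, hse] using
          ih (c + 1) 0 (c + 1) (c + 1) le_rfl rfl (by omega) (by intro; rfl)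
    · simpa [stepA, stepB, hch] using
        ih c (s + 1) 0 run (by omega) h1 (by intro; rfl) (by omega)

theorem inner_eq_zero (line : List String) :
    (line.foldl stepA ((0 : Int), (0 : Int))).1 = (line.foldl stepB ((0 : Int), (0 : Int))).2 :=
  inner_eq line 0 0 0 0 le_rfl rfl (by omega) (fun _ => rfl)

-- B's per-column run value
def runOf (line : List String) : Int := (line.foldl stepB (0, 0)).2

-- A's outer-loop step
def stepO (st : Int × Int × List Int) (line : List String) : Int × Int × List Int :=
  let lines := if st.1 > 6 then st.2.2 ++ [(1 : Int)] else st.2.2 ++ [(0 : Int)]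
  let cs := line.foldl stepA ((0 : Int), (0 : Int))
  (cs.1, cs.2, lines)

def flagOf (r : Int) : Int := if r > 6 then 1 else 0

-- A's lines list is the shifted, flag-mapped run list
theorem outer_lines (ls : List (List String)) : ∀ (c s : Int) (acc : List Int),
    (ls.foldl stepO (c, s, acc)).2.2 = acc ++ ((c :: ls.map runOf).dropLast).map flagOf := by
  induction ls with
  | nil => intro c s acc; simp
  | cons l rest ih =>
    intro c s acc
    simp only [List.foldl_cons, stepO, List.map_cons]
    rw [ih]
    have h1 : (l.foldl stepA ((0:Int), (0:Int))).1 = runOf l := inner_eq_zero l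
    by_cases hc : c > 6
    · simp [h1, flagOf, hc, List.dropLast_cons_of_ne_nil, List.map_cons]
    · simp [h1, flagOf, hc, List.dropLast_cons_of_ne_nil, List.map_cons]

-- A's scan step over the flag list
def stepS (cv : Int × Int) (num : Int) : Int × Int :=
  if num == 1 then (cv.1 + 1, cv.2)
  else ((0 : Int), if cv.1 > 1 then cv.2 + 1 else cv.2)

-- window count over triples: #windows (a,b,c) with a=0, b=1, c=1 (B's group-start count)
def scCount : List Int → Int
  | a :: b :: c :: t => (if a = 0 ∧ b = 1 ∧ c = 1 then 1 else 0) + scCount (b :: c :: t)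
  | _ => 0

-- B's zipped fold computes scCount
theorem zip_fold_eq (flags : List Int) :
    (((flags.zip (flags.drop 1)).zip (flags.drop 2)).foldl
      (fun v t => if t.1.1 = 0 ∧ t.1.2 = 1 ∧ t.2 = 1 then v + 1 else v) 0)
    = scCount flags := by
  suffices h : ∀ (l : List Int) (v : Int),
      (((l.zip (l.drop 1)).zip (l.drop 2)).foldl
        (fun v t => if t.1.1 = 0 ∧ t.1.2 = 1 ∧ t.2 = 1 then v + 1 else v) v)
      = v + scCount l by
    simpa using h flags 0
  intro l
  induction l using scCount.induct with
  | case1 a b c t ih =>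
    intro v
    simp only [List.drop_succ_cons, List.drop_zero, List.zip_cons_cons, List.foldl_cons]
    have := ih (if a = 0 ∧ b = 1 ∧ c = 1 then v + 1 else v)
    simp only [List.drop_succ_cons, List.drop_zero, List.zip_cons_cons] at this
    rw [this, scCount]
    by_cases hcond : a = 0 ∧ b = 1 ∧ c = 1 <;> (simp [hcond]; try ring)
  | case2 l hniceshape =>
    intro v
    match l, hniceshape with
    | [], _ => simp [scCount]
    | [a], _ => simp [scCount]
    | [a, b], _ => simp [scCount]
    | a :: b :: c :: t, h => exact (h a b c t rfl).elim

-- value-additivity of the stepS fold; the streak component ignores the value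
theorem foldS_add (xs : List Int) : ∀ (k v : Int),
    (xs.foldl stepS (k, v)).1 = (xs.foldl stepS (k, 0)).1 ∧
    (xs.foldl stepS (k, v)).2 = v + (xs.foldl stepS (k, 0)).2 := by
  induction xs with
  | nil => intro k v; simp
  | cons x t ih =>
    intro k v
    simp only [List.foldl_cons, stepS]
    by_cases hx : (x == 1) = true
    · simpa [hx] using ih (k + 1) v
    · simp only [hx, Bool.false_eq_true, if_false]
      constructor
      · split_ifs with hk
        · rw [(ih 0 (v + 1)).1, (ih 0 (0 + 1)).1]
        · exact (ih 0 v).1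
      · split_ifs with hk
        · rw [(ih 0 (v + 1)).2, (ih 0 (0 + 1)).2]
          ring
        · exact (ih 0 v).2

theorem foldS_nonneg (xs : List Int) : ∀ (k v : Int), 0 ≤ k → 0 ≤ (xs.foldl stepS (k, v)).1 := by
  induction xs with
  | nil => intro k v hk; simpa using hk
  | cons x t ih =>
    intro k v hk
    simp only [List.foldl_cons, stepS]
    by_cases hx : (x == 1) = true
    · exact hx ▸ (by simpa [hx] using ih (k + 1) _ (by omega))
    · simpa [hx] using ih 0 _ le_rfl

-- the final streak of the stepS fold is ≥1 iff the last element is 1, ≥2 iff the last two are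
theorem streak_last (G : List Int) (hb : ∀ x ∈ G, x = 0 ∨ x = 1) :
    ((1 ≤ (G.foldl stepS (0, 0)).1) ↔ G.getLast?.getD 0 = 1) ∧
    ((2 ≤ (G.foldl stepS (0, 0)).1) ↔ (G.getLast?.getD 0 = 1 ∧ G.dropLast.getLast?.getD 0 = 1)) := by
  induction G using List.reverseRecOn with
  | nil => norm_num
  | append_singleton H w ih =>
    have hbH : ∀ x ∈ H, x = 0 ∨ x = 1 := fun x hx => hb x (by simp [hx])
    have hw : w = 0 ∨ w = 1 := hb w (by simp)
    have ihH := ih hbH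
    rw [List.foldl_append]
    rw [List.getLast?_concat, List.dropLast_concat]
    rcases hw with hw | hw
    · subst hw
      simp only [List.foldl_cons, List.foldl_nil, stepS]
      norm_num
    · subst hw
      simp only [List.foldl_cons, List.foldl_nil, stepS]
      norm_num
      constructor
      · have := foldS_nonneg H 0 0 le_rfl
        omega
      · rw [show (2 ≤ (H.foldl stepS (0,0)).1 + 1) ↔ (1 ≤ (H.foldl stepS (0,0)).1) from by
            have := foldS_nonneg H 0 0 le_rfl
            omega]
        exact ihH.1

-- scCount over a twice-prefixed list, against the streak fold
theorem sc_gen (F : List Int) : ∀ (q p k : Int),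
    (∀ x ∈ F, x = 0 ∨ x = 1) → (q = 0 ∨ q = 1) → (p = 0 ∨ p = 1) → 0 ≤ k →
    (k = 0 → p = 0) → (k = 1 → p = 1 ∧ q = 0) → (2 ≤ k → p = 1 ∧ q = 1) →
    scCount (q :: p :: F) = (F.foldl stepS (k, 0)).2
      + (if 2 ≤ (F.foldl stepS (k, 0)).1 then 1 else 0)
      - (if 2 ≤ k then 1 else 0) := by
  induction F with
  | nil =>
    intro q p k _ _ _ _ _ _ _
    simp only [scCount, List.foldl_nil]
    split_ifs <;> ring
  | cons x t ih =>
    intro q p k hb hq hp hk h0 h1 h2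
    have hbx : x = 0 ∨ x = 1 := hb x (by simp)
    have hbt : ∀ y ∈ t, y = 0 ∨ y = 1 := fun y hy => hb y (by simp [hy])
    rw [show scCount (q :: p :: x :: t)
          = (if q = 0 ∧ p = 1 ∧ x = 1 then 1 else 0) + scCount (p :: x :: t) from rfl]
    rcases hbx with hx | hx
    · -- x = 0
      subst hx
      have hfold : ((0 : Int) :: t).foldl stepS (k, 0) = t.foldl stepS (0, if k > 1 then 1 else 0) := by
        simp [stepS]
      rw [hfold, (foldS_add t 0 (if k > 1 then 1 else 0)).1, (foldS_add t 0 (if k > 1 then 1 else 0)).2]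
      rw [ih p 0 0 hbt hp (Or.inl rfl) le_rfl (fun _ => rfl) (by omega) (by omega)]
      have hcf : ¬ (q = 0 ∧ p = 1 ∧ (0 : Int) = 1) := by rintro ⟨-, -, h⟩; norm_num at h
      simp only [hcf, if_false]
      split_ifs <;> omega
    · -- x = 1
      subst hx
      have hfold : ((1 : Int) :: t).foldl stepS (k, 0) = t.foldl stepS (k + 1, 0) := by
        simp [stepS]
      rw [hfold]
      rw [ih p 1 (k + 1) hbt hp (Or.inr rfl) (by omega) (by omega) (by omega) (by omega)]
      have hcond : (if q = 0 ∧ p = 1 ∧ (1 : Int) = 1 then (1 : Int) else 0)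
          = (if k = 1 then 1 else 0) := by
        by_cases hk1 : k = 1
        · obtain ⟨hp1, hq0⟩ := h1 hk1
          simp [hk1, hp1, hq0]
        · have hne : ¬ (q = 0 ∧ p = 1 ∧ (1 : Int) = 1) := by
            rintro ⟨hq0, hp1, -⟩
            have hk0 : k ≠ 0 := fun h => by rw [h0 h] at hp1; norm_num at hp1
            have hk2 : ¬ 2 ≤ k := fun h => by rw [(h2 h).2] at hq0; norm_num at hq0
            omega
          rw [if_neg hne, if_neg hk1]
      rw [hcond]
      split_ifs <;> omega

theorem scB (F : List Int) (hb : ∀ x ∈ F, x = 0 ∨ x = 1) :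
    scCount (0 :: F) = (F.foldl stepS (0, 0)).2 + (if 2 ≤ (F.foldl stepS (0, 0)).1 then 1 else 0) := by
  cases F with
  | nil => norm_num [scCount]
  | cons f0 rest =>
    have hb0 : f0 = 0 ∨ f0 = 1 := hb f0 (by simp)
    have hbr : ∀ y ∈ rest, y = 0 ∨ y = 1 := fun y hy => hb y (by simp [hy])
    rcases hb0 with h | h
    · subst h
      have hfold : ((0:Int) :: rest).foldl stepS ((0:Int), (0:Int)) = rest.foldl stepS (0, 0) := by
        simp [stepS]
      rw [hfold,
        sc_gen rest 0 0 0 hbr (Or.inl rfl) (Or.inl rfl) le_rfl (fun _ => rfl) (by omega) (by omega)]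
      norm_num
    · subst h
      have hfold : ((1:Int) :: rest).foldl stepS ((0:Int), (0:Int)) = rest.foldl stepS (1, 0) := by
        simp [stepS]
      rw [hfold,
        sc_gen rest 0 1 1 hbr (Or.inl rfl) (Or.inr rfl) (by omega) (by omega)
          (fun _ => ⟨rfl, rfl⟩) (by omega)]
      norm_num

-- flag condition read from the end of the flag list
def flagCondB (F : List Int) : Bool :=
  match F.reverse with
  | z :: y :: rest => if z = 1 then decide (y = 1) else decide (y = 1) && decide (rest.head?.getD 0 = 1)
  | _ => false

theorem flagCondB_cons (z y : Int) (rest : List Int) (L : List Int)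
    (h : L.reverse = z :: y :: rest) :
    flagCondB L = if z = 1 then decide (y = 1) else decide (y = 1) && decide (rest.head?.getD 0 = 1) := by
  unfold flagCondB
  rw [h]

-- core comparison: B's count equals A's (fold over the lag-truncated list) plus the edge bonus
theorem cmpAB (F : List Int) (hb : ∀ x ∈ F, x = 0 ∨ x = 1) :
    scCount (0 :: F) = (((0 :: F).dropLast).foldl stepS (0, 0)).2
      + (if flagCondB F = true then 1 else 0) := by
  rcases List.eq_nil_or_concat F with rfl | ⟨G, z, hF⟩
  · norm_num [scCount, flagCondB]
  · rw [List.concat_eq_append] at hF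
    subst hF
    have hbG : ∀ x ∈ G, x = 0 ∨ x = 1 := fun x hx => hb x (by simp [hx])
    have hbz : z = 0 ∨ z = 1 := hb z (by simp)
    have hdl : ((0 : Int) :: (G ++ [z])).dropLast = 0 :: G := by
      rw [show (0:Int) :: (G ++ [z]) = ((0:Int) :: G) ++ [z] from rfl, List.dropLast_concat]
    rw [hdl]
    have hA : (((0:Int) :: G).foldl stepS (0, 0)).2 = (G.foldl stepS (0, 0)).2 := by
      simp [stepS]
    rw [hA, scB (G ++ [z]) hb, List.foldl_append]
    have hS := streak_last G hbG
    have hK0 : 0 ≤ (G.foldl stepS (0, 0)).1 := foldS_nonneg G 0 0 le_rfl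
    rcases hGr : G.reverse with _ | ⟨y, rest⟩
    · -- G = []
      have hG : G = [] := by simpa using congrArg List.reverse hGr
      subst hG
      rcases hbz with hz | hz <;> subst hz <;> norm_num [stepS, flagCondB]
    · -- G = rest.reverse ++ [y]
      have hG : G = rest.reverse ++ [y] := by
        have := congrArg List.reverse hGr
        simpa using this
      have hlast : G.getLast?.getD 0 = y := by rw [hG, List.getLast?_concat]; rfl
      have hlast2 : G.dropLast.getLast?.getD 0 = rest.head?.getD 0 := by
        rw [hG, List.dropLast_concat, List.getLast?_reverse]
      rw [hlast] at hS
      rw [hlast2] at hS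
      have hcond : flagCondB (G ++ [z])
          = (if z = 1 then decide (y = 1) else decide (y = 1) && decide (rest.head?.getD 0 = 1)) := by
        unfold flagCondB
        rw [List.reverse_append, hGr]
        rfl
      rcases hbz with hz | hz <;> subst hz
      · -- z = 0
        simp only [List.foldl_cons, List.foldl_nil]
        have hstep : stepS (G.foldl stepS (0,0)) 0
            = (0, if (G.foldl stepS (0,0)).1 > 1 then (G.foldl stepS (0,0)).2 + 1
                  else (G.foldl stepS (0,0)).2) := by
          simp [stepS]
        simp only [hstep, hcond]
        simp only [show ((0:Int) = 1) = False from by norm_num, if_false,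
          Bool.and_eq_true, decide_eq_true_eq]
        norm_num
        by_cases h2 : 2 ≤ (G.foldl stepS (0,0)).1
        · obtain ⟨hy, hr⟩ := hS.2.mp h2
          rw [if_pos (by omega), if_pos ⟨hy, hr⟩]
        · rw [if_neg (by omega), if_neg (fun hc => h2 (hS.2.mpr hc))]
          ring
      · -- z = 1
        simp only [List.foldl_cons, List.foldl_nil]
        have hstep : stepS (G.foldl stepS (0,0)) 1
            = ((G.foldl stepS (0,0)).1 + 1, (G.foldl stepS (0,0)).2) := by
          simp [stepS]
        simp only [hstep, hcond]
        simp only [if_true, decide_eq_true_eq]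
        by_cases hy : y = 1
        · rw [if_pos (by have := hS.1.mpr hy; omega), if_pos hy]
        · rw [if_neg (fun hc => hy (hS.1.mp (by omega))), if_neg hy]

-- characterisation of B's run computation against top-run of the unreversed column
theorem runPair (c : List String) :
    ((c.reverse.foldl stepB ((0:Int),(0:Int))).1 = ((c.takeWhile pvFilled).length : Int))
    ∧ ((c.reverse.foldl stepB ((0:Int),(0:Int))).2
        = (((c.dropWhile (fun s => !(pvFilled s))).takeWhile pvFilled).length : Int)) := by
  induction c with
  | nil => simp
  | cons x m ih =>
    obtain ⟨ih1, ih2⟩ := ih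
    rw [List.reverse_cons, List.foldl_append]
    simp only [List.foldl_cons, List.foldl_nil]
    by_cases hx : pvFilled x = true
    · have hx' : (x == "+" || x == "#") = true := by
        simp only [pvFilled, decide_eq_true_eq] at hx
        simpa using hx
      have hstep : stepB (m.reverse.foldl stepB (0,0)) x
          = ((m.reverse.foldl stepB (0,0)).1 + 1, (m.reverse.foldl stepB (0,0)).1 + 1) := by
        unfold stepB
        rw [if_pos hx']
      rw [hstep, List.takeWhile_cons, if_pos hx, List.dropWhile_cons,
        if_neg (by simp [hx]), List.takeWhile_cons, if_pos hx]
      constructor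
      · rw [ih1]; push_cast [List.length_cons]; ring
      · rw [ih1]; push_cast [List.length_cons]; ring
    · have hxf : pvFilled x = false := by revert hx; cases pvFilled x <;> simp
      have hx' : (x == "+" || x == "#") = false := by
        simp only [pvFilled, decide_eq_false_iff_not] at hxf
        simpa using hxf
      have hstep : stepB (m.reverse.foldl stepB (0,0)) x
          = (0, (m.reverse.foldl stepB (0,0)).2) := by
        unfold stepB
        rw [if_neg (by simp [hx'])]
      rw [hstep, List.takeWhile_cons, if_neg (by simp [hxf]), List.dropWhile_cons,
        if_pos (by simp [hxf])]
      exact ⟨by simp, ih2⟩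

theorem flags_eq (image : List (List String)) :
    ((((pyZipStar image).map List.reverse).map runOf).map flagOf)
      = (List.range ((image.map List.length).min?.getD 0)).map
          (fun i => if pvTall image i then (1 : Int) else 0) := by
  cases image with
  | nil => simp [pyZipStar]
  | cons r rs =>
    have hn : (((r :: rs).map List.length).min?.getD 0)
        = (r :: rs).foldl (fun m l => min m l.length) r.length := by
      rw [List.map_cons, List.min?_cons', Option.getD_some, List.foldl_map, List.foldl_cons,
        min_self]
    rw [hn]
    unfold pyZipStar
    simp only [List.map_map]
    apply List.map_congr_left
    intro i _
    simp only [Function.comp]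
    unfold runOf
    rw [(runPair ((r :: rs).map (fun l => l.getD i ""))).2]
    unfold flagOf pvTall
    by_cases h : 6 < ((((r :: rs).map (fun l => l.getD i "")).dropWhile (fun s => !(pvFilled s))).takeWhile pvFilled).length
    · rw [if_pos (by exact_mod_cast h), if_pos (by simpa using h)]
    · rw [if_neg (by exact_mod_cast h), if_neg (by simpa using h)]

theorem cond_eval (n : Nat) (t : Nat → Bool) :
    flagCondB ((List.range n).map (fun i => if t i then (1 : Int) else 0)) =
      (decide (2 ≤ n) && t (n-2) && (t (n-1) || (decide (3 ≤ n) && t (n-3)))) := by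
  match n with
  | 0 => simp [flagCondB]
  | 1 => simp [flagCondB, List.range_succ]
  | (m+2) =>
    have hrev : (((List.range (m+2)).map (fun i => if t i then (1:Int) else 0)).reverse)
        = (if t (m+1) then (1:Int) else 0) :: (if t m then (1:Int) else 0)
          :: ((List.range m).map (fun i => if t i then (1:Int) else 0)).reverse := by
      rw [List.range_succ, List.range_succ]
      simp [List.reverse_append]
    rw [flagCondB_cons _ _ _ _ hrev]
    have e1 : m + 2 - 1 = m + 1 := by omega
    have e2 : m + 2 - 2 = m := by omega
    have e3 : m + 2 - 3 = m - 1 := by omega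
    rw [e1, e2, e3]
    have e4 : decide (2 ≤ m + 2) = true := by simp
    have e5 : decide (3 ≤ m + 2) = decide (1 ≤ m) := by
      by_cases h : 1 ≤ m <;> simp [h]
    rw [e4, e5]
    by_cases hm : 1 ≤ m
    · obtain ⟨j, rfl⟩ : ∃ j, m = j + 1 := ⟨m - 1, by omega⟩
      have hh : (((List.range (j+1)).map (fun i => if t i then (1:Int) else 0)).reverse).head?.getD 0
          = (if t j then (1:Int) else 0) := by
        rw [List.range_succ]
        simp [List.reverse_append]
      rw [hh]
      have ej : j + 1 - 1 = j := by omega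
      rw [ej]
      cases ht1 : t (j+2) <;> cases ht0 : t (j+1) <;> cases ht2 : t j <;>
        simp_all
    · have hm0 : m = 0 := by omega
      subst hm0
      cases ht1 : t 1 <;> cases ht0 : t 0 <;> simp

-- assembly: B = A + (1 if the edge condition holds)
theorem AB_key (matrix : List (List (List String))) (image_no : Int) (image : List (List String))
    (hget : PySem.List.pyGet? matrix image_no = some image) :
    vertical_lines_alt matrix image_no
      = vertical_lines matrix image_no + (if pvDcond image = true then 1 else 0) := by
  have hbF : ∀ x ∈ (((pyZipStar image).map List.reverse).map runOf).map flagOf, x = 0 ∨ x = 1 := by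
    intro x hx
    rcases List.mem_map.1 hx with ⟨r, -, rfl⟩
    unfold flagOf
    split_ifs <;> simp
  unfold vertical_lines vertical_lines_alt
  rw [hget]
  simp only []
  have houter := outer_lines ((pyZipStar image).map List.reverse) 0 0 []
  have hCongr : ∀ (l : List (List String)),
      l.foldl (fun (st : Int × Int × List Int) line =>
        let lines := if st.1 > 6 then st.2.2 ++ [(1 : Int)] else st.2.2 ++ [(0 : Int)]
        let cs :=
          line.foldl (fun (cs : Int × Int) ch =>
            if ch == "+" || ch == "#" then
              let cs' := if cs.2 > 0 then ((0 : Int), (0 : Int)) else cs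
              (cs'.1 + 1, cs'.2)
            else (cs.1, cs.2 + 1)) (0, 0)
        (cs.1, cs.2, lines)) ((0 : Int), (0 : Int), ([] : List Int))
      = l.foldl stepO (0, 0, []) := fun l => rfl
  rw [hCongr, houter]
  have hlam : ∀ (fl : List Int),
      (fl.foldl (fun (cv : Int × Int) num =>
        if num == 1 then (cv.1 + 1, cv.2)
        else ((0 : Int), if cv.1 > 1 then cv.2 + 1 else cv.2)) ((0:Int), (0:Int)))
      = fl.foldl stepS (0, 0) := fun _ => rfl
  rw [hlam]
  rw [zip_fold_eq]
  have hflags : (((pyZipStar image).map List.reverse).map (fun line =>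
      (line.foldl (fun (rc : Int × Int) ch =>
        if ch == "+" || ch == "#" then (rc.1 + 1, rc.1 + 1) else ((0 : Int), rc.2)) (0, 0)).2)).map
        (fun r => if r > 6 then (1 : Int) else 0)
      = (((pyZipStar image).map List.reverse).map runOf).map flagOf := rfl
  rw [hflags]
  simp only [List.nil_append]
  have hdl : ((0 :: ((pyZipStar image).map List.reverse).map runOf).dropLast).map flagOf
      = (0 :: (((pyZipStar image).map List.reverse).map runOf).map flagOf).dropLast := by
    rw [List.map_dropLast, List.map_cons, show flagOf 0 = 0 from by norm_num [flagOf]]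
  rw [hdl]
  rw [cmpAB _ hbF]
  have hc : flagCondB ((((pyZipStar image).map List.reverse).map runOf).map flagOf)
      = pvDcond image := by
    rw [flags_eq image, cond_eval ((image.map List.length).min?.getD 0) (pvTall image)]
    rfl
  rw [hc]

-- ===== VERDICT (by name: the statements are the Claim_ definitions above) =====
theorem vertical_lines_spec : Claim_unchanged_vertical_lines := by
  intro matrix image_no _ _ hnD
  cases hget : PySem.List.pyGet? matrix image_no with
  | none =>
    show vertical_lines _ _ = vertical_lines_alt _ _
    unfold vertical_lines vertical_lines_alt
    rw [hget]
  | some image =>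
    have hkey := AB_key matrix image_no image hget
    have hD : pvDcond image = false := by
      by_contra h
      have htrue : pvDcond image = true := by revert h; cases pvDcond image <;> simp
      exact hnD (by
        show ((PySem.List.pyGet? matrix image_no).map (fun img =>
          let n := (img.map List.length).min?.getD 0
          decide (2 ≤ n) && pvTall img (n-2)
            && (pvTall img (n-1) || (decide (3 ≤ n) && pvTall img (n-3))))).getD false = true
        rw [hget]
        exact htrue)
    show vertical_lines _ _ = vertical_lines_alt _ _
    rw [hkey, hD]
    norm_num

theorem vertical_lines_changed : Claim_changed_vertical_lines := by
  unfold Claim_changed_vertical_lines; decide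

theorem vertical_lines_tight : Claim_exact_vertical_lines := by
  intro matrix image_no _ _ hD
  cases hget : PySem.List.pyGet? matrix image_no with
  | none =>
    exfalso
    unfold D_vertical_lines at hD
    rw [hget] at hD
    simp at hD
  | some image =>
    have hkey := AB_key matrix image_no image hget
    have htrue : pvDcond image = true := by
      unfold D_vertical_lines at hD
      rw [hget] at hD
      exact hD
    rw [hkey, htrue]
    norm_num
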